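-- pv_equiv track=rewrite | github.com/lighterEB/nullhubx | tools/nullclaw_config_catalog.py | brace_delta
-- ===== SOURCE A (Python) =====
-- def strip_line_comment(line: str) -> str:
--     in_str = False
--     escaped = False
--     for i, ch in enumerate(line):
--         if ch == '"' and not escaped:
--             in_str = not in_str
--         if not in_str and ch == '/' and i + 1 < len(line) and line[i + 1] == '/':
--             return line[:i]
--         escaped = (ch == '\\' and not escaped)
--         if ch != '\\':
--             escaped = False
--     return line
--
-- def brace_delta(line: str) -> int:
--     s = strip_line_comment(line)
--     in_str = False
--     escaped = False
--     delta = 0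
--     for ch in s:
--         if ch == '"' and not escaped:
--             in_str = not in_str
--         elif not in_str:
--             if ch == '{':
--                 delta += 1
--             elif ch == '}':
--                 delta -= 1
--         escaped = (ch == '\\' and not escaped)
--         if ch != '\\':
--             escaped = False
--     return delta
-- ===== SOURCE B (Python) =====
-- def brace_delta(line: str) -> int:
--     # Single fused pass: comment cutoff, string state and brace counting in one loop (no stripped-string copy).
--     in_str = False
--     escaped = False
--     delta = 0
--     n = len(line)
--     for i, ch in enumerate(line):
--         if ch == '"' and not escaped:
--             in_str = not in_str
--         elif not in_str:
--             if ch == '/' and i + 1 < n and line[i + 1] == '/':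
--                 return delta
--             if ch == '{':
--                 delta += 1
--             elif ch == '}':
--                 delta -= 1
--         escaped = ch == '\\' and not escaped
--     return delta
-- ===== Notes on version B (the rewrite author's own statement) =====
-- stated objective: alternative
-- what changed: Fuses strip_line_comment and the brace-counting reparse into one linear pass that returns the running delta at the comment cutoff, instead of building the stripped string and running the state machine twice over the prefix.
import Mathlib
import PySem

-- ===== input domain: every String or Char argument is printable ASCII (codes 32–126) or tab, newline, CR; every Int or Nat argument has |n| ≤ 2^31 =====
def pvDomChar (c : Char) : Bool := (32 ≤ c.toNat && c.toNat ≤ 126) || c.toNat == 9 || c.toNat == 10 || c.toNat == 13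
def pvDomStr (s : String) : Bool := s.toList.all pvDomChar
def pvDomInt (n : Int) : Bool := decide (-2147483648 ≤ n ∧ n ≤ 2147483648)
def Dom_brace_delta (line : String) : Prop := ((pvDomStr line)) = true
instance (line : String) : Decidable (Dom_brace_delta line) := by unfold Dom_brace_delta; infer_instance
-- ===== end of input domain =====

-- B fuses A's two passes (strip_line_comment, then brace reparse) into one linear pass
-- that returns the running delta at the comment cutoff, avoiding the intermediate stripped string.

-- ===== PORT A =====
-- strip_line_comment's `for i, ch in enumerate(line)` ported as recursion carrying the index i;
-- `line[i + 1]` via PySem.List.pyGet?, `line[:i]` via take (exact: i is a Nat in range).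
def stripAux (full : List Char) : Nat → List Char → Bool → Bool → List Char
  | _, [], _, _ => full
  | i, ch :: rest, inStr, escaped =>
    let inStr' := if ch == '"' && !escaped then !inStr else inStr
    if !inStr' && ch == '/' && decide (i + 1 < full.length)
        && (PySem.List.pyGet? full ((i : Int) + 1) == some '/') then
      full.take i
    else
      let e1 := ch == '\\' && !escaped
      let escaped' := if !(ch == '\\') then false else e1
      stripAux full (i + 1) rest inStr' escaped'

def braceAux : List Char → Bool → Bool → Int → Int
  | [], _, _, d => d
  | ch :: rest, inStr, escaped, d =>
    let inStr' := if ch == '"' && !escaped then !inStr else inStr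
    let d' := if ch == '"' && !escaped then d
      else if !inStr then
        (if ch == '{' then d + 1 else if ch == '}' then d - 1 else d)
      else d
    let e1 := ch == '\\' && !escaped
    let escaped' := if !(ch == '\\') then false else e1
    braceAux rest inStr' escaped' d'

def brace_delta (line : String) : Int :=
  let s := stripAux line.toList 0 line.toList false false
  braceAux s false false 0

-- ===== PORT B =====
-- Source B's lookahead `i + 1 < n and line[i + 1] == '/'` ported as rest.head? == some '/'
-- (exact: rest is the list of characters after position i).
def altAux : List Char → Bool → Bool → Int → Int
  | [], _, _, d => d
  | ch :: rest, inStr, escaped, d =>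
    if ch == '"' && !escaped then
      altAux rest (!inStr) (ch == '\\' && !escaped) d
    else if !inStr then
      if ch == '/' && (rest.head? == some '/') then d
      else
        let d' := if ch == '{' then d + 1 else if ch == '}' then d - 1 else d
        altAux rest inStr (ch == '\\' && !escaped) d'
    else
      altAux rest inStr (ch == '\\' && !escaped) d

def brace_delta_alt (line : String) : Int :=
  altAux line.toList false false 0

-- ===== PRECONDITION & SPEC =====
def Spec_brace_delta (line : String) (out : Int) : Prop := out = brace_delta_alt line
instance (line : String) (out : Int) : Decidable (Spec_brace_delta line out) := by unfold Spec_brace_delta; infer_instance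

-- ===== CLAIM (what is proved, stated in full; the proofs are below) =====
def Claim_equal_brace_delta : Prop := ∀ (line : String), Dom_brace_delta line → Spec_brace_delta line (brace_delta line)

-- ===== LEMMAS AND PROOFS =====

-- the shared (in_str, escaped) state machine and the shared delta update
def pvStep (s : Bool × Bool) (ch : Char) : Bool × Bool :=
  (if ch == '"' && !s.2 then !s.1 else s.1, ch == '\\' && !s.2)

def pvStepD (s : Bool × Bool) (d : Int) (ch : Char) : Int :=
  if ch == '"' && !s.2 then d
  else if !s.1 then (if ch == '{' then d + 1 else if ch == '}' then d - 1 else d)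
  else d

theorem braceAux_cons (ch : Char) (rest : List Char) (s : Bool × Bool) (d : Int) :
    braceAux (ch :: rest) s.1 s.2 d
      = braceAux rest (pvStep s ch).1 (pvStep s ch).2 (pvStepD s d ch) := by
  simp only [braceAux, pvStep, pvStepD]
  by_cases h : ch == '\\' <;> simp [h]

theorem braceAux_snoc (xs : List Char) (ch : Char) : ∀ (s : Bool × Bool) (d : Int),
    braceAux (xs ++ [ch]) s.1 s.2 d
      = pvStepD (xs.foldl pvStep s) (braceAux xs s.1 s.2 d) ch := by
  induction xs with
  | nil =>
    intro s d
    rw [List.nil_append, braceAux_cons, List.foldl_nil]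
    rfl
  | cons c t ih =>
    intro s d
    rw [List.cons_append, braceAux_cons, braceAux_cons, List.foldl_cons]
    exact ih (pvStep s c) (pvStepD s d c)

theorem look_lemma (pre rest' : List Char) (ch : Char) :
    (decide (pre.length + 1 < (pre ++ ch :: rest').length)
      && (PySem.List.pyGet? (pre ++ ch :: rest') ((pre.length : Int) + 1) == some '/'))
      = (rest'.head? == some '/') := by
  cases rest' with
  | nil => simp
  | cons c t =>
    have h : PySem.List.pyGet? (pre ++ ch :: c :: t) ((pre.length : Int) + 1)
        = some c := by
      have := PySem.List.pyGet?_append_right (pre := pre) (ys := ch :: c :: t) (k := 1)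
      simpa using this
    simp [h, List.length_append]

theorem esc_eq (ch : Char) (e : Bool) :
    (if !(ch == '\\') then false else (ch == '\\' && e)) = (ch == '\\' && e) := by
  by_cases h : ch == '\\' <;> simp [h]

theorem stripAux_cons (pre rest' : List Char) (ch : Char) (s : Bool × Bool) :
    stripAux (pre ++ ch :: rest') pre.length (ch :: rest') s.1 s.2
      = if (!(pvStep s ch).1 && ch == '/' && (rest'.head? == some '/')) then pre
        else stripAux (pre ++ ch :: rest') (pre.length + 1) rest'
              (pvStep s ch).1 (pvStep s ch).2 := by
  simp only [stripAux, pvStep, esc_eq]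
  rw [Bool.and_assoc, look_lemma]
  by_cases h : ((!if (ch == '"' && !s.2) = true then !s.1 else s.1) && ch == '/'
      && (rest'.head? == some '/')) = true
  · rw [if_pos h, if_pos h, List.take_left]
  · rw [if_neg h, if_neg h]

theorem altAux_cons (ch : Char) (rest' : List Char) (s : Bool × Bool) (d : Int) :
    altAux (ch :: rest') s.1 s.2 d
      = if (!(pvStep s ch).1 && ch == '/' && (rest'.head? == some '/')) then d
        else altAux rest' (pvStep s ch).1 (pvStep s ch).2 (pvStepD s d ch) := by
  rcases s with ⟨i, e⟩
  by_cases hq : (ch == '"' && !e) = true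
  · have hch : ch = '"' := (beq_iff_eq).mp ((Bool.and_eq_true _ _).mp hq).1
    have he : e = false := by
      have := ((Bool.and_eq_true _ _).mp hq).2
      simpa using this
    subst hch; subst he
    simp [altAux, pvStep, pvStepD]
  · have hq' : (ch == '"' && !e) = false := by simpa using hq
    by_cases hi : i = true
    · subst hi
      simp [altAux, pvStep, pvStepD, hq']
    · have hi' : i = false := by simpa using hi
      subst hi'
      by_cases hc : (ch == '/' && (rest'.head? == some '/')) = true
      · have h1 : (ch == '/') = true := ((Bool.and_eq_true _ _).mp hc).1
        have h2 : (rest'.head? == some '/') = true := ((Bool.and_eq_true _ _).mp hc).2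
        simp [altAux, pvStep, hq', h1, h2]
      · have hc' : (ch == '/' && (rest'.head? == some '/')) = false := by simpa using hc
        simp [altAux, pvStep, pvStepD, hq', hc']

theorem key (rest : List Char) : ∀ (pre : List Char),
    braceAux (stripAux (pre ++ rest) pre.length rest
        (pre.foldl pvStep (false, false)).1 (pre.foldl pvStep (false, false)).2)
        false false 0
      = altAux rest (pre.foldl pvStep (false, false)).1 (pre.foldl pvStep (false, false)).2
          (braceAux pre false false 0) := by
  induction rest with
  | nil =>
    intro pre
    simp [stripAux, altAux]
  | cons ch rest' ih =>
    intro pre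
    rw [stripAux_cons, altAux_cons]
    by_cases hcut : (!(pvStep (pre.foldl pvStep (false, false)) ch).1 && ch == '/'
        && (rest'.head? == some '/')) = true
    · rw [if_pos hcut, if_pos hcut]
    · rw [if_neg hcut, if_neg hcut]
      have h := ih (pre ++ [ch])
      rw [List.foldl_append, List.foldl_cons, List.foldl_nil] at h
      rw [show braceAux (pre ++ [ch]) false false 0
            = pvStepD (pre.foldl pvStep (false, false)) (braceAux pre false false 0) ch from
          by simpa using braceAux_snoc pre ch (false, false) 0] at h
      simpa using h

-- ===== VERDICT (by name: the statement is the Claim_ definition above) =====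
theorem brace_delta_spec : Claim_equal_brace_delta := by
  intro line _
  unfold Spec_brace_delta brace_delta brace_delta_alt
  have h := key line.toList []
  simpa [braceAux] using h
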